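-- pv_equiv track=rewrite | github.com/cla7aye15I4nd/cla7aye15i4nd.github.io | blog_engine/markdown_ext.py | normalize_list_indentation
-- ===== SOURCE A (Python) =====
-- def normalize_list_indentation(markdown_text: str) -> str:
--     """
--     Convert 2-space GitHub-style indents to 4-space for markdown parser.
--
--     GitHub uses 2-space indentation for nested lists, but standard markdown
--     requires 4-space indentation. This function normalizes the indentation.
--
--     Args:
--         markdown_text: Markdown content with potential 2-space indents
--
--     Returns:
--         Markdown content with normalized 4-space indents
--     """
--     lines = markdown_text.split('\n')
--     result = []
--
--     for line in lines:
--         # Count leading spaces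
--         stripped = line.lstrip(' ')
--
--         # Check if this is a list item line
--         if stripped.startswith(('-', '*', '+')) or (stripped and stripped[0].isdigit() and '.' in stripped[:4]):
--             indent = len(line) - len(stripped)
--             # Convert 2-space multiples to 4-space multiples
--             if indent > 0:
--                 new_indent = (indent // 2) * 4
--                 result.append(' ' * new_indent + stripped)
--             else:
--                 result.append(line)
--         else:
--             result.append(line)
--
--     return '\n'.join(result)
-- ===== SOURCE B (Python) =====
-- def _is_list_line(body):
--     return body.startswith(('-', '*', '+')) or (body and body[0].isdigit() and '.' in body[:4])
--
--
-- def normalize_list_indentation(markdown_text: str) -> str: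
--     """Single forward scan over the text (no split/join): at each line start,
--     measure the run of leading spaces, take the line body up to the newline,
--     and emit either a rescaled 4-space indent or the original prefix."""
--     out = []
--     i, n = 0, len(markdown_text)
--     while True:
--         j = i
--         while j < n and markdown_text[j] == ' ':
--             j += 1
--         k = j
--         while k < n and markdown_text[k] != '\n':
--             k += 1
--         body = markdown_text[j:k]
--         if j > i and _is_list_line(body):
--             out.append(' ' * (((j - i) // 2) * 4))
--         else:
--             out.append(markdown_text[i:j])
--         out.append(body)
--         if k == n:
--             break
--         out.append('\n')
--         i = k + 1
--     return ''.join(out)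
-- ===== Notes on version B (the rewrite author's own statement) =====
-- stated objective: alternative
-- what changed: Replaced the split-into-lines / per-line list / join pipeline with a single forward index scan over the text that measures each line's leading-space run and body in place and emits the output incrementally, never materialising a list of lines.
import Mathlib
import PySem

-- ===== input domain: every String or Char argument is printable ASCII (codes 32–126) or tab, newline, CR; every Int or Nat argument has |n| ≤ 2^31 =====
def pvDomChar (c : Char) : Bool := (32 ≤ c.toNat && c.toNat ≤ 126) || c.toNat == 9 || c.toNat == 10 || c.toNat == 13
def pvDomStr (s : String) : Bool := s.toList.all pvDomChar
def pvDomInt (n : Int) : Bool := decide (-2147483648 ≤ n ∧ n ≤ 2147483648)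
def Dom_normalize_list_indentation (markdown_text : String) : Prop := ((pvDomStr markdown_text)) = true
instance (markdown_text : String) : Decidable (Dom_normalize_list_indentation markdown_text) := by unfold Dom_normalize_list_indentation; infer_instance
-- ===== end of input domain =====

-- B replaces A's split-into-lines/per-line-list/join pipeline with a single forward scan over the
-- character stream that emits each line's (possibly rescaled) indent and body in place; objective: alternative.

-- ===== PORT A =====
-- body of A's for-loop over lines (Python lstrip(' ') = dropWhile (· == ' '), exact)
def pvLineA (line : List Char) : List Char :=
  let stripped := line.dropWhile (fun c => c == ' ')
  let isItem :=
    PySem.Chars.startswith stripped ['-'] || PySem.Chars.startswith stripped ['*'] ||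
    PySem.Chars.startswith stripped ['+'] ||
    (match stripped with
     | [] => false
     | c0 :: _ => PySem.Chars.isdigit c0 && PySem.Chars.isIn ['.'] (PySem.Chars.slice stripped none (some 4)))
  if isItem then
    let indent := line.length - stripped.length
    if indent > 0 then List.replicate ((indent / 2) * 4) ' ' ++ stripped
    else line
  else line

def normalize_list_indentation (markdown_text : String) : String :=
  let lines := PySem.Chars.splitOn markdown_text.toList ['\n']
  let result := lines.foldl (fun result line => result ++ [pvLineA line]) []
  String.ofList (PySem.Chars.join ['\n'] result)

-- ===== PORT B =====
def pvIsListLine (body : List Char) : Bool :=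
  PySem.Chars.startswith body ['-'] || PySem.Chars.startswith body ['*'] ||
  PySem.Chars.startswith body ['+'] ||
  (match body with
   | [] => false
   | c0 :: _ => PySem.Chars.isdigit c0 && PySem.Chars.isIn ['.'] (PySem.Chars.slice body none (some 4)))

-- B's while-loop: at a line start, advance over the run of leading spaces, then over the
-- body up to '\n', emit the (possibly rescaled) prefix plus the body, and continue past the '\n'
def pvScanB (cs : List Char) : List Char :=
  let spaces := cs.takeWhile (fun c => c == ' ')
  let rest := cs.dropWhile (fun c => c == ' ')
  let body := rest.takeWhile (fun c => c != '\n')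
  let pre :=
    if spaces.length > 0 && pvIsListLine body then
      List.replicate ((spaces.length / 2) * 4) ' '
    else spaces
  match h : rest.dropWhile (fun c => c != '\n') with
  | [] => pre ++ body
  | _ :: t => pre ++ body ++ '\n' :: pvScanB t
termination_by cs.length
decreasing_by
  have h2 := List.length_dropWhile_le (p := fun c => c != '\n') (l := cs.dropWhile (fun c => c == ' '))
  have h3 := List.length_dropWhile_le (p := fun c => c == ' ') (l := cs)
  rw [h] at h2
  simp at h2
  omega

def normalize_list_indentation_alt (markdown_text : String) : String :=
  String.ofList (pvScanB markdown_text.toList)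

-- ===== PRECONDITION & SPEC =====
def Spec_normalize_list_indentation (markdown_text : String) (out : String) : Prop := out = normalize_list_indentation_alt markdown_text
instance (markdown_text : String) (out : String) : Decidable (Spec_normalize_list_indentation markdown_text out) := by unfold Spec_normalize_list_indentation; infer_instance

-- ===== CLAIM (what is proved, stated in full; the proofs are below) =====
def Claim_equal_normalize_list_indentation : Prop := ∀ (markdown_text : String), Dom_normalize_list_indentation markdown_text → Spec_normalize_list_indentation markdown_text (normalize_list_indentation markdown_text)

-- ===== LEMMAS AND PROOFS =====
def pvConsHead (x : List Char) : List (List Char) → List (List Char)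
  | [] => [x]
  | h :: t => (x ++ h) :: t

def pvSplitNL : List Char → List (List Char)
  | [] => [[]]
  | c :: cs => if c = '\n' then [] :: pvSplitNL cs else pvConsHead [c] (pvSplitNL cs)

theorem pvSplitNL_ne_nil (cs : List Char) : pvSplitNL cs ≠ [] := by
  cases cs with
  | nil => simp [pvSplitNL]
  | cons c cs =>
    simp only [pvSplitNL]
    split
    · simp
    · cases h : pvSplitNL cs <;> simp [pvConsHead]

theorem pvSplitNL_view (cs : List Char) : pvSplitNL cs =
    (match cs.dropWhile (fun c => c != '\n') with
     | [] => [cs.takeWhile (fun c => c != '\n')]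
     | _ :: t => cs.takeWhile (fun c => c != '\n') :: pvSplitNL t) := by
  induction cs with
  | nil => rfl
  | cons c cs ih =>
    by_cases hc : c = '\n'
    · subst hc; simp [pvSplitNL, List.dropWhile_cons, List.takeWhile_cons]
    · simp only [pvSplitNL, hc, if_false, ih, List.dropWhile_cons, List.takeWhile_cons]
      cases hd : List.dropWhile (fun c => c != '\n') cs <;> simp [hc, hd, pvConsHead]

theorem pvSplitOn_go_eq (fuel : Nat) :
    ∀ (l : List Char) (cur : List Char) (acc : List (List Char)), l.length ≤ fuel →
      PySem.Chars.splitOn.go ['\n'] fuel l cur acc =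
        acc.reverse ++ pvConsHead cur.reverse (pvSplitNL l) := by
  induction fuel with
  | zero =>
    intro l cur acc hl
    have : l = [] := by cases l <;> simp_all
    subst this
    simp [PySem.Chars.splitOn.go, pvSplitNL, pvConsHead]
  | succ f ih =>
    intro l cur acc hl
    cases l with
    | nil => simp [PySem.Chars.splitOn.go, pvSplitNL, pvConsHead]
    | cons c rest =>
      by_cases hc : c = '\n'
      · subst hc
        rw [PySem.Chars.splitOn.go]
        rw [if_pos (by simp [List.isPrefixOf])]
        rw [show List.drop ['\n'].length ('\n' :: rest) = rest from rfl]
        rw [ih rest [] (List.reverse cur :: acc) (by simp at hl; omega)]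
        simp only [pvSplitNL, pvConsHead, if_pos rfl, List.reverse_cons, List.reverse_reverse]
        cases hsp : pvSplitNL rest with
        | nil => exact absurd hsp (pvSplitNL_ne_nil rest)
        | cons hd tl => simp [pvConsHead]
      · rw [PySem.Chars.splitOn.go]
        rw [if_neg (by simp [List.isPrefixOf]; exact fun h => hc h.symm)]
        rw [ih rest (c :: cur) acc (by simp at hl; omega)]
        simp only [pvSplitNL, hc, if_false]
        cases hsp : pvSplitNL rest with
        | nil => simp [pvConsHead]
        | cons hd tl => simp [pvConsHead]

theorem pvSplitOn_eq (cs : List Char) : PySem.Chars.splitOn cs ['\n'] = pvSplitNL cs := by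
  rw [PySem.Chars.splitOn, pvSplitOn_go_eq (cs.length + 1) cs [] [] (by omega)]
  cases h : pvSplitNL cs with
  | nil => exact absurd h (pvSplitNL_ne_nil cs)
  | cons hd tl => simp [pvConsHead]
theorem pvLineA_eq (l : List Char) :
    pvLineA l =
      (if pvIsListLine (l.dropWhile (fun c => c == ' ')) then
         if l.length - (l.dropWhile (fun c => c == ' ')).length > 0 then
           List.replicate (((l.length - (l.dropWhile (fun c => c == ' ')).length) / 2) * 4) ' ' ++
             l.dropWhile (fun c => c == ' ')
         else l
       else l) := rfl

-- per-line agreement: B's emitted chunk for one line is A's transformed line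
theorem pvLine_eq (l : List Char) :
    (if (l.takeWhile (fun c => c == ' ')).length > 0 && pvIsListLine ((l.dropWhile (fun c => c == ' '))) then
       List.replicate (((l.takeWhile (fun c => c == ' ')).length / 2) * 4) ' '
     else l.takeWhile (fun c => c == ' ')) ++ l.dropWhile (fun c => c == ' ') = pvLineA l := by
  have hsplit := List.takeWhile_append_dropWhile (p := fun c => c == ' ') (l := l)
  have hlen : (l.takeWhile (fun c => c == ' ')).length =
      l.length - (l.dropWhile (fun c => c == ' ')).length := by
    have := congrArg List.length hsplit
    simp only [List.length_append] at this
    omega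
  rw [pvLineA_eq]
  cases hb : pvIsListLine (l.dropWhile (fun c => c == ' ')) with
  | false => simpa [hb] using hsplit
  | true =>
    simp only [hb, Bool.and_true, if_true]
    by_cases hsp : (l.takeWhile (fun c => c == ' ')).length > 0
    · rw [if_pos (by simp [hsp]), if_pos (by omega), ← hlen]
    · have c1 : ¬ (decide ((List.takeWhile (fun c => c == ' ') l).length > 0) = true) := by
        rw [decide_eq_true_iff]
        exact hsp
      have c2 : ¬ (l.length - (List.dropWhile (fun c => c == ' ') l).length > 0) := by omega
      rw [if_neg c1, if_neg c2]
      exact hsplit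

theorem pvTakeSpaces (cs : List Char) :
    cs.takeWhile (fun c => c == ' ') = (cs.takeWhile (fun c => c != '\n')).takeWhile (fun c => c == ' ') := by
  induction cs with
  | nil => rfl
  | cons c cs ih =>
    by_cases hs : c = ' '
    · subst hs; simp [List.takeWhile_cons, ih]
    · by_cases hn : c = '\n'
      · subst hn; simp [List.takeWhile_cons]
      · simp [List.takeWhile_cons, hs, hn]
theorem pvBodyEq (cs : List Char) :
    (cs.dropWhile (fun c => c == ' ')).takeWhile (fun c => c != '\n') =
      (cs.takeWhile (fun c => c != '\n')).dropWhile (fun c => c == ' ') := by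
  induction cs with
  | nil => rfl
  | cons c cs ih =>
    by_cases hs : c = ' '
    · subst hs; simp [List.takeWhile_cons, List.dropWhile_cons, ih]
    · by_cases hn : c = '\n'
      · subst hn; simp [List.takeWhile_cons, List.dropWhile_cons]
      · simp [List.takeWhile_cons, List.dropWhile_cons, hs, hn]
theorem pvTailEq (cs : List Char) :
    (cs.dropWhile (fun c => c == ' ')).dropWhile (fun c => c != '\n') =
      cs.dropWhile (fun c => c != '\n') := by
  induction cs with
  | nil => rfl
  | cons c cs ih =>
    by_cases hs : c = ' '
    · subst hs; simp [List.dropWhile_cons, ih]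
    · by_cases hn : c = '\n'
      · subst hn; simp [List.dropWhile_cons]
      · simp [List.dropWhile_cons, hs, hn]

theorem pvScanB_eq_join_aux (n : Nat) : ∀ cs : List Char, cs.length ≤ n →
    pvScanB cs = PySem.Chars.join ['\n'] ((pvSplitNL cs).map pvLineA) := by
  induction n with
  | zero =>
    intro cs hl
    have hc : cs = [] := by cases cs <;> simp_all
    subst hc
    simp [pvScanB, pvSplitNL, pvLineA, PySem.Chars.join, List.intercalate]
  | succ n ih =>
    intro cs hl
    rw [pvScanB, pvSplitNL_view cs]
    split
    next h =>
      have htail : cs.dropWhile (fun c => c != '\n') = [] := (pvTailEq cs) ▸ h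
      rw [htail]
      simp only [List.map_cons, List.map_nil]
      rw [PySem.Chars.join_singleton]
      rw [pvTakeSpaces cs, pvBodyEq cs]
      exact pvLine_eq _
    next x t h =>
      have htail : cs.dropWhile (fun c => c != '\n') = x :: t := (pvTailEq cs) ▸ h
      have hlt : t.length ≤ n := by
        have h2 := List.length_dropWhile_le (p := fun c => c != '\n') (l := cs)
        rw [htail] at h2
        simp at h2
        omega
      rw [htail]
      obtain ⟨b, bl, hbl⟩ : ∃ b bl, (pvSplitNL t).map pvLineA = b :: bl := by
        cases hsp : pvSplitNL t with
        | nil => exact absurd hsp (pvSplitNL_ne_nil t)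
        | cons p q => exact ⟨pvLineA p, q.map pvLineA, by simp [hsp]⟩
      simp only [List.map_cons, hbl]
      rw [PySem.Chars.join_cons_cons]
      rw [← hbl, ← ih t hlt]
      rw [pvTakeSpaces cs, pvBodyEq cs]
      rw [← pvLine_eq (cs.takeWhile (fun c => c != '\n'))]
      simp

theorem pvScanB_eq_join (cs : List Char) :
    pvScanB cs = PySem.Chars.join ['\n'] ((pvSplitNL cs).map pvLineA) :=
  pvScanB_eq_join_aux cs.length cs le_rfl

-- ===== VERDICT (by name: the statement is the Claim_ definition above) =====
theorem normalize_list_indentation_spec : Claim_equal_normalize_list_indentation := by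
  intro markdown_text _
  unfold Spec_normalize_list_indentation normalize_list_indentation normalize_list_indentation_alt
  simp only []
  rw [PySem.List.foldl_append_singleton_eq_map, pvSplitOn_eq, pvScanB_eq_join]
  simp
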